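-- pv_equiv track=rewrite | github.com/MathPlayer/advent-of-code-solved | 2024/08/solve.py | get_antennas_lists
-- ===== SOURCE A (Python) =====
-- def get_antennas_lists(data):
--     antennas = {}
--     for pos, value in data.items():
--         if value == '.':
--             continue
--         if value not in antennas:
--             antennas[value] = []
--         antennas[value].append(pos)
--
--     # Sort the antennas list by value.
--     return {x: sorted(y) for x, y in antennas.items()}
-- ===== SOURCE B (Python) =====
-- def get_antennas_lists(data):
--     # Simpler decomposition: dedup the non-'.' values once (first-occurrence
--     # order, matching dict insertion order), then build each sorted bucket by a
--     # direct comprehension over the items.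
--     values = dict.fromkeys(v for v in data.values() if v != '.')
--     return {v: sorted(pos for pos, w in data.items() if w == v) for v in values}
-- ===== Notes on version B (the rewrite author's own statement) =====
-- stated objective: simpler
-- what changed: A builds a dict of buckets incrementally (insert-empty-then-append per item) and then sorts each bucket; B instead dedups the non-'.' values once (first-occurrence order) and builds each entry directly as a sorted filter-comprehension over the items, with no incremental dict state.
import Mathlib
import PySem

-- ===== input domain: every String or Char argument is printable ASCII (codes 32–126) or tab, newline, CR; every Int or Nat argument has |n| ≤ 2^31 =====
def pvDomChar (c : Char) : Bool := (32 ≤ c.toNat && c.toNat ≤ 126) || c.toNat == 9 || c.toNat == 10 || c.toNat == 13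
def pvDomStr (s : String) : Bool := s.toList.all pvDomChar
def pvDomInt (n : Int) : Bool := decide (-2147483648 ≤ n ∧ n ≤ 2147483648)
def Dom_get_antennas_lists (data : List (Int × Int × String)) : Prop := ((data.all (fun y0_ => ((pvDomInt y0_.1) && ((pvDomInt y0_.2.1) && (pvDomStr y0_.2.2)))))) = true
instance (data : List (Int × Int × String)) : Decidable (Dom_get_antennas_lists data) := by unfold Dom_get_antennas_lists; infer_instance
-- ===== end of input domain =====

-- B replaces A's incremental dict-of-buckets grouping (then a sort per bucket) by a one-shot
-- dedup of the non-'.' values plus a sorted filter-comprehension per value (objective: simpler).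

-- ===== PORT A =====
def pvStepA (d : PySem.Dict String (List (Int × Int))) (t : Int × Int × String) :
    PySem.Dict String (List (Int × Int)) :=
  let d' := if d.contains t.2.2 then d else d.insert t.2.2 []
  d'.modify t.2.2 [] (fun y => y ++ [(t.1, t.2.1)])

def get_antennas_lists (data : List (Int × Int × String)) : List (String × List (Int × Int)) :=
  let antennas := data.foldl (fun d t => if t.2.2 == "." then d else pvStepA d t) PySem.Dict.empty
  antennas.items.map (fun p => (p.1, PySem.List.sorted2 p.2 (fun q => q.1) (fun q => q.2)))

-- ===== PORT B =====
def get_antennas_lists_alt (data : List (Int × Int × String)) : List (String × List (Int × Int)) :=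
  let values := PySem.List.dedup ((data.map (fun t => t.2.2)).filter (fun v => !(v == ".")))
  values.map (fun v =>
    (v, PySem.List.sorted2 ((data.filter (fun t => t.2.2 == v)).map (fun t => (t.1, t.2.1)))
          (fun q => q.1) (fun q => q.2)))

-- ===== PRECONDITION & SPEC =====
def Spec_get_antennas_lists (data : List (Int × Int × String)) (out : List (String × List (Int × Int))) : Prop := out = get_antennas_lists_alt data
instance (data : List (Int × Int × String)) (out : List (String × List (Int × Int))) : Decidable (Spec_get_antennas_lists data out) := by unfold Spec_get_antennas_lists; infer_instance

-- ===== CLAIM (what is proved, stated in full; the proofs are below) =====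
def Claim_equal_get_antennas_lists : Prop := ∀ (data : List (Int × Int × String)), Dom_get_antennas_lists data → Spec_get_antennas_lists data (get_antennas_lists data)

-- ===== LEMMAS AND PROOFS =====

theorem pvStepA_eq_modify (d : PySem.Dict String (List (Int × Int))) (t : Int × Int × String) :
    pvStepA d t = d.modify t.2.2 [] (fun y => y ++ [(t.1, t.2.1)]) := by
  unfold pvStepA
  by_cases h : d.contains t.2.2 = true
  · simp [h]
  · simp only [if_neg h]
    have hany : (d.items.any fun p => p.1 == t.2.2) = false := by
      simp only [PySem.Dict.contains] at h
      exact eq_false_of_ne_true h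
    have hne : ∀ p ∈ d.items, ¬ p.1 = t.2.2 := by
      intro p hp
      have := List.any_eq_false.mp hany p hp
      simpa using this
    have hfind : d.items.find? (fun p => p.1 == t.2.2) = none := by
      rw [List.find?_eq_none]; intro p hp; simpa using hne p hp
    simp [PySem.Dict.modify, PySem.Dict.insert, PySem.Dict.getD, PySem.Dict.get?,
      PySem.Dict.contains, hany, List.find?_append, hfind, List.any_append]
    calc List.map (fun p => if p.1 = t.2.2 then (t.2.2, [(t.1, t.2.1)]) else p) d.items
        = List.map (fun p => p) d.items := List.map_congr_left (fun p hp => by simp [hne p hp])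
      _ = d.items := List.map_id' _

theorem pvItems_eq_keys_map {ν : Type} (items : List (String × ν)) (dflt : ν)
    (h : (items.map (fun e => e.1)).Nodup) :
    items = (items.map (fun e => e.1)).map
      (fun k => (k, (PySem.Dict.mk items).getD k dflt)) := by
  induction items with
  | nil => rfl
  | cons e rest ih =>
    simp only [List.map_cons, List.nodup_cons] at h ⊢
    have hhead : (PySem.Dict.mk (e :: rest)).getD e.1 dflt = e.2 := by
      simp [PySem.Dict.getD, PySem.Dict.get?]
    rw [hhead]
    have htail : (rest.map (fun e => e.1)).map
        (fun k => (k, (PySem.Dict.mk (e :: rest)).getD k dflt))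
        = (rest.map (fun e => e.1)).map
        (fun k => (k, (PySem.Dict.mk rest).getD k dflt)) := by
      apply List.map_congr_left
      intro k hk
      have hne : ¬ (e.1 == k) = true := by
        simp only [beq_iff_eq]; intro he; exact h.1 (he ▸ hk)
      simp [PySem.Dict.getD, PySem.Dict.get?, hne]
    rw [htail, ← ih h.2]

-- A = B on every input (the domain hypothesis is not needed)
theorem get_antennas_lists_eq_alt (data : List (Int × Int × String)) :
    get_antennas_lists data = get_antennas_lists_alt data := by
  simp only [get_antennas_lists, get_antennas_lists_alt]
  have hfun : (fun (d : PySem.Dict String (List (Int × Int))) (t : Int × Int × String) =>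
        if t.2.2 == "." then d else pvStepA d t)
      = (fun d t => if (!(t.2.2 == ".")) = true
          then d.modify t.2.2 [] (fun y => y ++ [(t.1, t.2.1)]) else d) := by
    funext d t
    by_cases hb : (t.2.2 == ".") = true <;> simp [hb, pvStepA_eq_modify]
  rw [hfun, PySem.List.foldl_if_eq_foldl_filter]
  -- now a fold over fd := data.filter (fun t => !(t.2.2 == "."))
  have hmapfold :
      (data.filter (fun t => !(t.2.2 == "."))).foldl
        (fun d t => d.modify t.2.2 [] (fun y => y ++ [(t.1, t.2.1)])) PySem.Dict.empty
      = ((data.filter (fun t => !(t.2.2 == "."))).map (fun t => (t.2.2, (t.1, t.2.1)))).foldl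
        (fun d p => d.modify p.1 [] (fun y => y ++ [p.2])) PySem.Dict.empty := by
    rw [List.foldl_map]
  rw [hmapfold]
  set fd := data.filter (fun t => !(t.2.2 == ".")) with hfd
  set l := fd.map (fun t => (t.2.2, (t.1, t.2.1))) with hl
  set F := l.foldl (fun d p => d.modify p.1 [] (fun y => y ++ [p.2])) PySem.Dict.empty with hF
  have hkeys : F.keys = PySem.Set.ofList (l.map (fun p => p.1)) := by
    rw [hF, PySem.Dict.keys_foldl_modify_key l (fun p => p.1) [] (fun _ p ys => ys ++ [p.2])]
    rfl
  have hnodup : F.keys.Nodup := by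
    rw [hF]
    exact PySem.Dict.nodup_keys_foldl_modify_key l (fun p => p.1) [] (fun _ p ys => ys ++ [p.2])
      PySem.Dict.empty (by simp [PySem.Dict.empty, PySem.Dict.keys])
  have hgetD : ∀ c, F.getD c [] = (l.filter (fun p => p.1 == c)).map (fun p => p.2) := by
    intro c
    rw [hF, PySem.Dict.getD_foldl_modify_append l PySem.Dict.empty c]
    simp [PySem.Dict.empty, PySem.Dict.getD, PySem.Dict.get?]
  have hitems : F.items = F.keys.map (fun k => (k, F.getD k [])) := by
    have h1 := pvItems_eq_keys_map F.items [] hnodup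
    exact h1
  rw [hitems, List.map_map]
  -- keys coincide with B's values
  have hK : F.keys = PySem.List.dedup ((data.map (fun t => t.2.2)).filter (fun v => !(v == "."))) := by
    rw [hkeys, PySem.List.dedup_eq_ofList, hl, List.map_map, List.filter_map]
    rfl
  rw [← hK]
  apply List.map_congr_left
  intro v hv
  have hvne : ¬ v = "." := by
    rw [hK, PySem.List.dedup_eq_ofList] at hv
    have := (PySem.Set.mem_ofList _ _).mp hv
    rcases List.mem_filter.mp this with ⟨_, hb⟩
    simpa using hb
  simp only [Function.comp, hgetD v]
  congr 1
  rw [hl, List.filter_map, List.map_map, hfd, List.filter_filter]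
  have : (data.filter (fun t => (t.2.2 == v) && !(t.2.2 == "."))) = data.filter (fun t => t.2.2 == v) := by
    apply List.filter_congr
    intro t _
    by_cases ht : (t.2.2 == v) = true
    · have : t.2.2 = v := by simpa using ht
      simp [this, hvne]
    · simp [ht]
  rw [← this]
  rfl

-- ===== VERDICT (by name: the statement is the Claim_ definition above) =====
theorem get_antennas_lists_spec : Claim_equal_get_antennas_lists := by
  intro data _
  unfold Spec_get_antennas_lists
  exact get_antennas_lists_eq_alt data
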